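-- pv_equiv track=rewrite | github.com/jakeret/pdsp202003 | src/pdsp2019/ranking.py | compute_instrument_ranks
-- ===== SOURCE A (Python) =====
-- RATING_NON_SWISS = 100
--
-- RATING_DEFAULT = 1
--
-- RATING_GDP = 5
--
-- CURRENCY_GDP = 'GBP'
--
-- RATING_EUR = 6
--
-- CURRENCY_EUR = 'EUR'
--
-- RATING_USD = 7
--
-- CURRENCY_USD = 'USD'
--
-- def compute_instrument_ranks(instruments, ch_cl=False):
--     rating = 0
--
--     #check if swiss client
--     if ch_cl:
--         for instrument in instruments:
--             if not instrument["ignore"]: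
--                 if not instrument["expired"]:
--
--                     instr_curr = instrument["currency"]
--
--                     if instr_curr == CURRENCY_USD:
--                         rating += RATING_USD
--                     elif instr_curr == CURRENCY_EUR:
--                         rating += RATING_EUR
--                     elif instr_curr == CURRENCY_GDP:
--                         rating += RATING_GDP
--                     else:
--                         rating += RATING_DEFAULT
--     else:
--         rating = len(instruments) * RATING_NON_SWISS
--
--     return rating
-- ===== SOURCE B (Python) =====
-- RATING_NON_SWISS = 100
-- RATING_DEFAULT = 1
-- RATING_GDP = 5
-- CURRENCY_GDP = 'GBP'
-- RATING_EUR = 6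
-- CURRENCY_EUR = 'EUR'
-- RATING_USD = 7
-- CURRENCY_USD = 'USD'
--
--
-- def compute_instrument_ranks(instruments, ch_cl=False):
--     if not ch_cl:
--         return len(instruments) * RATING_NON_SWISS
--     # group pass: count active instruments per currency
--     counts = {}
--     for instrument in instruments:
--         if not instrument["ignore"] and not instrument["expired"]:
--             c = instrument["currency"]
--             counts[c] = counts.get(c, 0) + 1
--     rating_map = {CURRENCY_USD: RATING_USD, CURRENCY_EUR: RATING_EUR, CURRENCY_GDP: RATING_GDP}
--     # weighted pass over the distinct currencies
--     return sum(n * rating_map.get(c, RATING_DEFAULT) for c, n in counts.items())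
-- ===== Notes on version B (the rewrite author's own statement) =====
-- stated objective: alternative
-- what changed: B replaces A's per-instrument if/elif rating accumulation with a two-phase grouping: one pass builds a frequency table of currencies of active instruments, then a weighted pass over the distinct (currency, count) pairs with a rating map and .get default; the non-swiss branch stays len(instruments)*RATING_NON_SWISS.
import Mathlib
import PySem

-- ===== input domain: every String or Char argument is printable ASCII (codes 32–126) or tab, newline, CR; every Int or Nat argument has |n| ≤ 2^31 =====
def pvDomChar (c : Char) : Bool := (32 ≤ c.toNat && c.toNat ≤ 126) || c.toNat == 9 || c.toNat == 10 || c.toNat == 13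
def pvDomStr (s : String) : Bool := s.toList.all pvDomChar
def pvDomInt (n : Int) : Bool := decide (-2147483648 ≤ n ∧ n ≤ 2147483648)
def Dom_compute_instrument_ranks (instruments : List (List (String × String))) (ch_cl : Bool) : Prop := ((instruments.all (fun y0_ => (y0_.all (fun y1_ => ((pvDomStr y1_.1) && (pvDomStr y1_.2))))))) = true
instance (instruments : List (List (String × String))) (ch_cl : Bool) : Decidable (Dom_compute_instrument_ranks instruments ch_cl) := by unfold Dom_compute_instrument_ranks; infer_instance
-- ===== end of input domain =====

-- B replaces A's per-instrument if/elif accumulation with a currency frequency table plus a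
-- weighted pass over its distinct entries (alternative decomposition, same cost).

-- ===== PORT A =====
-- dict access d[k] is first-match lookup on the association list (KeyError = none, excluded by Pre_)
def compute_instrument_ranks (instruments : List (List (String × String))) (ch_cl : Bool) : Int :=
  if ch_cl then
    instruments.foldl (fun rating instrument =>
      match List.lookup "ignore" instrument with
      | none => rating   -- KeyError in Python; Pre_ excludes this
      | some ig =>
        if ig = "" then
          match List.lookup "expired" instrument with
          | none => rating   -- KeyError in Python; Pre_ excludes this
          | some ex =>
            if ex = "" then
              match List.lookup "currency" instrument with
              | none => rating   -- KeyError in Python; Pre_ excludes this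
              | some c =>
                if c = "USD" then rating + 7
                else if c = "EUR" then rating + 6
                else if c = "GBP" then rating + 5
                else rating + 1
            else rating
        else rating) 0
  else (instruments.length : Int) * 100

-- ===== PORT B =====
def pvRatingMap : PySem.Dict String Int := PySem.Dict.ofList [("USD", 7), ("EUR", 6), ("GBP", 5)]

def compute_instrument_ranks_alt (instruments : List (List (String × String))) (ch_cl : Bool) : Int :=
  if !ch_cl then (instruments.length : Int) * 100
  else
    -- group pass: counts[c] = counts.get(c, 0) + 1 for active instruments
    let counts : PySem.Dict String Int := instruments.foldl (fun d instrument =>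
      match List.lookup "ignore" instrument with
      | none => d   -- KeyError in Python; Pre_ excludes this
      | some ig =>
        if ig = "" then
          match List.lookup "expired" instrument with
          | none => d   -- KeyError in Python; Pre_ excludes this
          | some ex =>
            if ex = "" then
              match List.lookup "currency" instrument with
              | none => d   -- KeyError in Python; Pre_ excludes this
              | some c => d.insert c (d.getD c 0 + 1)
            else d
        else d) PySem.Dict.empty
    -- weighted pass over the distinct (currency, count) pairs
    counts.items.foldl (fun acc p => acc + p.2 * pvRatingMap.getD p.1 1) 0

-- ===== PRECONDITION & SPEC =====
-- Pre_ excludes exactly the inputs on which Python A raises KeyError: with ch_cl, every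
-- instrument must carry "ignore", then (if not ignored) "expired", then (if not expired) "currency".
def Pre_compute_instrument_ranks (instruments : List (List (String × String))) (ch_cl : Bool) : Prop :=
  ch_cl = true → ∀ i ∈ instruments,
    (List.lookup "ignore" i).isSome = true ∧
    (List.lookup "ignore" i = some "" →
      (List.lookup "expired" i).isSome = true ∧
      (List.lookup "expired" i = some "" → (List.lookup "currency" i).isSome = true))
instance (instruments : List (List (String × String))) (ch_cl : Bool) : Decidable (Pre_compute_instrument_ranks instruments ch_cl) := by unfold Pre_compute_instrument_ranks; infer_instance
def pvWitness_compute_instrument_ranks : (List (List (String × String))) × Bool :=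
  ([[("ignore", ""), ("expired", ""), ("currency", "USD")], [("ignore", "x")]], true)

def Spec_compute_instrument_ranks (instruments : List (List (String × String))) (ch_cl : Bool) (out : Int) : Prop := out = compute_instrument_ranks_alt instruments ch_cl
instance (instruments : List (List (String × String))) (ch_cl : Bool) (out : Int) : Decidable (Spec_compute_instrument_ranks instruments ch_cl out) := by unfold Spec_compute_instrument_ranks; infer_instance

-- ===== CLAIM (what is proved, stated in full; the proofs are below) =====
def Claim_equal_compute_instrument_ranks : Prop := ∀ (instruments : List (List (String × String))) (ch_cl : Bool), Dom_compute_instrument_ranks instruments ch_cl → Pre_compute_instrument_ranks instruments ch_cl → Spec_compute_instrument_ranks instruments ch_cl (compute_instrument_ranks instruments ch_cl)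

-- ===== LEMMAS AND PROOFS =====

-- the active currency of an instrument (none = skipped), and the per-currency weight
def pvAct (i : List (String × String)) : Option String :=
  match List.lookup "ignore" i with
  | some ig =>
    if ig = "" then
      match List.lookup "expired" i with
      | some ex =>
        if ex = "" then List.lookup "currency" i else none
      | none => none
    else none
  | none => none

def pvW (c : String) : Int :=
  if c = "USD" then 7 else if c = "EUR" then 6 else if c = "GBP" then 5 else 1

lemma pvRatingMap_getD (c : String) : pvRatingMap.getD c 1 = pvW c := by
  unfold pvRatingMap pvW
  simp only [PySem.Dict.ofList]
  by_cases h1 : c = "USD" <;> by_cases h2 : c = "EUR" <;> by_cases h3 : c = "GBP" <;> simp_all <;>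
    first
      | decide
      | simp [PySem.Dict.update, List.foldl, PySem.Dict.getD_insert, PySem.Dict.getD_empty, h1, h2, h3]

lemma foldlA (l : List (List (String × String))) (r : Int) :
    l.foldl (fun rating instrument =>
      match List.lookup "ignore" instrument with
      | none => rating
      | some ig =>
        if ig = "" then
          match List.lookup "expired" instrument with
          | none => rating
          | some ex =>
            if ex = "" then
              match List.lookup "currency" instrument with
              | none => rating
              | some c =>
                if c = "USD" then rating + 7
                else if c = "EUR" then rating + 6
                else if c = "GBP" then rating + 5
                else rating + 1
            else rating
        else rating) r
    = r + ((l.filterMap pvAct).map pvW).sum := by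
  induction l generalizing r with
  | nil => simp
  | cons i t ih =>
    simp only [List.foldl_cons]
    rw [ih]
    unfold pvAct pvW
    rcases hig : List.lookup "ignore" i with _ | ig
    · simp [List.filterMap_cons, pvAct, hig]
    · by_cases he : ig = ""
      · rcases hex : List.lookup "expired" i with _ | ex
        · simp [List.filterMap_cons, pvAct, hig, he, hex]
        · by_cases he2 : ex = ""
          · rcases hc : List.lookup "currency" i with _ | c
            · simp [List.filterMap_cons, pvAct, hig, he, hex, he2, hc]
            · simp only [List.filterMap_cons, pvAct, hig, he, hex, he2, hc, if_pos, List.map_cons,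
                List.sum_cons, pvW]
              split_ifs <;> ring
          · simp [List.filterMap_cons, pvAct, hig, he, hex, he2]
      · simp [List.filterMap_cons, pvAct, hig, he]

lemma foldlB (l : List (List (String × String))) (d : PySem.Dict String Int) :
    l.foldl (fun d instrument =>
      match List.lookup "ignore" instrument with
      | none => d
      | some ig =>
        if ig = "" then
          match List.lookup "expired" instrument with
          | none => d
          | some ex =>
            if ex = "" then
              match List.lookup "currency" instrument with
              | none => d
              | some c => d.insert c (d.getD c 0 + 1)
            else d
        else d) d
    = (l.filterMap pvAct).foldl (fun d c => d.insert c (d.getD c 0 + 1)) d := by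
  induction l generalizing d with
  | nil => simp
  | cons i t ih =>
    simp only [List.foldl_cons]
    rcases hig : List.lookup "ignore" i with _ | ig
    · simp [List.filterMap_cons, pvAct, hig, ih]
    · by_cases he : ig = ""
      · rcases hex : List.lookup "expired" i with _ | ex
        · simp [List.filterMap_cons, pvAct, hig, he, hex, ih]
        · by_cases he2 : ex = ""
          · rcases hc : List.lookup "currency" i with _ | c
            · simp [List.filterMap_cons, pvAct, hig, he, hex, he2, hc, ih]
            · simp [List.filterMap_cons, pvAct, hig, he, hex, he2, hc, ih]
          · simp [List.filterMap_cons, pvAct, hig, he, hex, he2, ih]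
      · simp [List.filterMap_cons, pvAct, hig, he, ih]

lemma foldl_add_sum (l : List (String × Int)) (a : Int) :
    l.foldl (fun acc p => acc + p.2 * pvRatingMap.getD p.1 1) a
    = a + (l.map (fun p => p.2 * pvW p.1)).sum := by
  induction l generalizing a with
  | nil => simp
  | cons p t ih =>
    rw [List.foldl_cons, ih, pvRatingMap_getD]
    simp [List.sum_cons]
    ring

lemma grouped_sum (xs : List String) :
    ((PySem.Set.ofList xs).map (fun k => (xs.count k : Int) * pvW k)).sum
    = (xs.map pvW).sum := by
  rw [← List.sum_toFinset _ (PySem.Set.nodup_ofList xs)]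
  have hfs : (PySem.Set.ofList xs).toFinset = xs.toFinset := by
    ext a; simp [PySem.Set.mem_ofList]
  rw [hfs, Finset.sum_list_map_count]
  refine Finset.sum_congr rfl ?_
  intro a _
  simp [nsmul_eq_mul]

lemma main_eq (instruments : List (List (String × String))) (ch_cl : Bool) :
    compute_instrument_ranks instruments ch_cl = compute_instrument_ranks_alt instruments ch_cl := by
  unfold compute_instrument_ranks compute_instrument_ranks_alt
  cases ch_cl with
  | false => simp
  | true =>
    simp only [Bool.not_true, if_pos, Bool.false_eq_true, if_neg]
    rw [foldlA, foldlB, PySem.Dict.foldl_insert_getD_add_one_eq_counter, foldl_add_sum,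
      PySem.Dict.items_counter]
    rw [List.map_map]
    rw [zero_add, zero_add]
    exact (grouped_sum _).symm

-- ===== VERDICT (by name: the statement is the Claim_ definition above) =====
theorem compute_instrument_ranks_spec : Claim_equal_compute_instrument_ranks := by
  intro instruments ch_cl _ _
  unfold Spec_compute_instrument_ranks
  exact main_eq instruments ch_cl
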